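-- pv_equiv track=rewrite | github.com/mikasimoncelli/Thermal-Hotspot-Detection | detect_hotspots.py | summarize_detections
-- ===== SOURCE A (Python) =====
-- def summarize_detections(results):
--     """
--     Group frame-by-frame detections into continuous hotspot sequences.
--     Returns a list of tuples: (hotspot_id, start_frame, end_frame).
--     """
--     if not results:
--         return []
--
--     # Make sure the results are in order by frame number
--     results.sort(key=lambda x: x[0])
--
--     sequences = []
--     current_sequence = None
--
--     for frame_num, boxes in results:
--         if boxes:  # There's a hotspot in this frame
--             if current_sequence is None:
--                 # Start a new hotspot sequence
--                 current_sequence = [len(sequences) + 1, frame_num, frame_num]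
--             else:
--                 # Update the sequence with the current frame
--                 current_sequence[2] = frame_num
--         else:
--             if current_sequence is not None:
--                 # End the current sequence since no hotspot was detected
--                 sequences.append(tuple(current_sequence))
--                 current_sequence = None
--
--     # If a sequence was active at the end add it
--     if current_sequence is not None:
--         sequences.append(tuple(current_sequence))
--
--     return sequences
-- ===== SOURCE B (Python) =====
-- def summarize_detections(results):
--     """
--     Group frame-by-frame detections into continuous hotspot sequences.
--     Returns a list of tuples: (hotspot_id, start_frame, end_frame).
--     """
--     results.sort(key=lambda x: x[0])
--     sequences = []
--     i, n = 0, len(results)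
--     while i < n:
--         if results[i][1]:
--             # scan to the end of this continuous run of detection frames
--             j = i + 1
--             while j < n and results[j][1]:
--                 j += 1
--             sequences.append((len(sequences) + 1, results[i][0], results[j - 1][0]))
--             i = j
--         else:
--             i += 1
--     return sequences
-- ===== Notes on version B (the rewrite author's own statement) =====
-- stated objective: alternative
-- what changed: A's single pass with an optional open-sequence state (start/extend/flush) is replaced by a run-splitting scan: an inner while consumes each continuous run of detection frames whole and emits one (id, start, end) tuple per run.
import Mathlib
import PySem

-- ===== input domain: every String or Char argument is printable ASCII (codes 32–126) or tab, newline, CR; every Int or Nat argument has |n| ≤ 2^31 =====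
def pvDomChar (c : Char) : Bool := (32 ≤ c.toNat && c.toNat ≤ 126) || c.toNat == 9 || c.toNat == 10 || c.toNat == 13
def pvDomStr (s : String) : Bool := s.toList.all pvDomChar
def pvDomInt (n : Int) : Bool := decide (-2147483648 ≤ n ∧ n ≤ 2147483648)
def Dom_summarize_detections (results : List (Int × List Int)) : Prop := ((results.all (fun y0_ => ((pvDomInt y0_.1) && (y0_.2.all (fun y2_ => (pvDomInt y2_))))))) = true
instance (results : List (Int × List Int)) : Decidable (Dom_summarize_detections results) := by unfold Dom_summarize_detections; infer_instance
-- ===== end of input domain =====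

-- B replaces A's one-pass state machine (optional open sequence) by a run-splitting scan
-- (inner while consumes each detection run whole); same return value ('alternative').
-- Both A and B sort `results` in place (results.sort); the equivalence proved is about the return value.

-- ===== PORT A =====
-- one loop iteration of A's for-loop: state = (sequences, current_sequence)
def pvStepA (st : List (Int × Int × Int) × Option (Int × Int × Int)) (p : Int × List Int) :
    List (Int × Int × Int) × Option (Int × Int × Int) :=
  if p.2 ≠ [] then
    match st.2 with
    | none => (st.1, some (((st.1.length : Int) + 1), p.1, p.1))
    | some (i, s, _) => (st.1, some (i, s, p.1))
  else
    match st.2 with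
    | some c => (st.1 ++ [c], none)
    | none => st

def summarize_detections (results : List (Int × List Int)) : List (Int × Int × Int) :=
  if results = [] then []
  else
    let st := (PySem.List.sorted results (fun x => x.1) false).foldl pvStepA ([], none)
    match st.2 with
    | some c => st.1 ++ [c]
    | none => st.1

-- ===== PORT B =====
-- Source B's outer while-loop: at a detection frame, the inner while scans to the run's end
-- (takeWhile/dropWhile = the scan to index j), appends one summary tuple, resumes after the run.
def pvTruthy (p : Int × List Int) : Bool := !p.2.isEmpty

def pvGoB : List (Int × List Int) → List (Int × Int × Int) → List (Int × Int × Int)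
  | [], acc => acc
  | (f, b) :: rest, acc =>
    if b ≠ [] then
      pvGoB (rest.dropWhile pvTruthy)
        (acc ++ [(((acc.length : Int) + 1), f,
                  (((rest.takeWhile pvTruthy).getLast?).map Prod.fst).getD f)])
    else pvGoB rest acc
termination_by xs _ => xs.length
decreasing_by
  · have h := List.length_dropWhile_le pvTruthy rest
    simp only [List.length_cons]; omega
  · simp

def summarize_detections_alt (results : List (Int × List Int)) : List (Int × Int × Int) :=
  pvGoB (PySem.List.sorted results (fun x => x.1) false) []

-- ===== PRECONDITION & SPEC =====
def Spec_summarize_detections (results : List (Int × List Int)) (out : List (Int × Int × Int)) : Prop := out = summarize_detections_alt results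
instance (results : List (Int × List Int)) (out : List (Int × Int × Int)) : Decidable (Spec_summarize_detections results out) := by unfold Spec_summarize_detections; infer_instance

-- ===== CLAIM (what is proved, stated in full; the proofs are below) =====
def Claim_equal_summarize_detections : Prop := ∀ (results : List (Int × List Int)), Dom_summarize_detections results → Spec_summarize_detections results (summarize_detections results)

-- ===== LEMMAS AND PROOFS =====
-- A's finalisation: flush the open sequence, if any
def pvFinA (st : List (Int × Int × Int) × Option (Int × Int × Int)) : List (Int × Int × Int) :=
  match st.2 with
  | some c => st.1 ++ [c]
  | none => st.1

theorem pv_key : ∀ (n : Nat) (xs : List (Int × List Int)), xs.length ≤ n →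
    (∀ acc, pvFinA (xs.foldl pvStepA (acc, none)) = pvGoB xs acc) ∧
    (∀ acc s e, pvFinA (xs.foldl pvStepA (acc, some (((acc.length : Int) + 1), s, e))) =
      pvGoB (xs.dropWhile pvTruthy)
        (acc ++ [(((acc.length : Int) + 1), s,
                  (((xs.takeWhile pvTruthy).getLast?).map Prod.fst).getD e)])) := by
  intro n
  induction n with
  | zero =>
    intro xs hx
    have : xs = [] := List.eq_nil_of_length_eq_zero (Nat.le_zero.mp hx)
    subst this
    constructor
    · intro acc; simp [pvGoB, pvFinA]
    · intro acc s e; simp [pvGoB, pvFinA]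
  | succ n ih =>
    intro xs hx
    cases xs with
    | nil =>
      constructor
      · intro acc; simp [pvGoB, pvFinA]
      · intro acc s e; simp [pvGoB, pvFinA]
    | cons hd rest =>
      obtain ⟨f, b⟩ := hd
      have hr : rest.length ≤ n := by simp at hx; omega
      constructor
      · intro acc
        by_cases hb : b = []
        · subst hb
          rw [List.foldl_cons]
          have h1 : pvStepA (acc, none) (f, []) = (acc, none) := by simp [pvStepA]
          rw [h1, (ih rest hr).1]
          rw [pvGoB]; simp
        · rw [List.foldl_cons]
          have h1 : pvStepA (acc, none) (f, b) = (acc, some (((acc.length : Int) + 1), f, f)) := by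
            simp [pvStepA, hb]
          rw [h1, (ih rest hr).2]
          rw [pvGoB]; simp [hb]
      · intro acc s e
        by_cases hb : b = []
        · subst hb
          rw [List.foldl_cons]
          have h1 : pvStepA (acc, some (((acc.length : Int) + 1), s, e)) (f, []) =
              (acc ++ [(((acc.length : Int) + 1), s, e)], none) := by simp [pvStepA]
          rw [h1, (ih rest hr).1]
          have ht : pvTruthy (f, ([] : List Int)) = false := by simp [pvTruthy]
          rw [List.dropWhile_cons_of_neg (by simp [ht]), List.takeWhile_cons_of_neg (by simp [ht])]
          rw [pvGoB]; simp
        · rw [List.foldl_cons]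
          have h1 : pvStepA (acc, some (((acc.length : Int) + 1), s, e)) (f, b) =
              (acc, some (((acc.length : Int) + 1), s, f)) := by simp [pvStepA, hb]
          rw [h1, (ih rest hr).2]
          have ht : pvTruthy (f, b) = true := by simp [pvTruthy, hb]
          rw [List.dropWhile_cons_of_pos (by simp [ht]), List.takeWhile_cons_of_pos (by simp [ht])]
          cases h : rest.takeWhile pvTruthy with
          | nil => simp
          | cons a l => simp [List.getLast?_cons]

-- ===== VERDICT (by name: the statement is the Claim_ definition above) =====
theorem summarize_detections_spec : Claim_equal_summarize_detections := by
  intro results _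
  unfold Spec_summarize_detections summarize_detections summarize_detections_alt
  by_cases h : results = []
  · subst h; simp [PySem.List.sorted, pvGoB]
  · simp only [h, if_false]
    exact ((pv_key _ _ le_rfl).1 [])
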